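-- pv_equiv track=rewrite | github.com/MatthewDaws/CodeJam | 2015_1b/b_slow.py | unhappy
-- ===== SOURCE A (Python) =====
-- def nbhs(row, col, R, C):
--     out = []
--     if row != 0:
--         out.append( (row-1, col))
--     if row != R - 1:
--         out.append( (row+1, col))
--     if col != 0:
--         out.append( (row, col-1))
--     if col != C - 1:
--         out.append( (row, col+1))
--     return out
--
-- def unhappy(matrix):
--     num_rows = len(matrix)
--     num_cols = len(matrix[0])
--     count = 0
--     for row in range(num_rows):
--         for col in range(num_cols):
--             if matrix[row][col] == 1:
--                 count += sum( matrix[n[0]][n[1]] == 1 for n in nbhs(row, col, num_rows, num_cols) )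
--     return count
-- ===== SOURCE B (Python) =====
-- def unhappy(matrix):
--     num_rows = len(matrix)
--     num_cols = len(matrix[0])
--     edges = 0
--     for r in range(num_rows):
--         for c in range(num_cols - 1):
--             if matrix[r][c] == 1 and matrix[r][c + 1] == 1:
--                 edges += 1
--     for r in range(num_rows - 1):
--         for c in range(num_cols):
--             if matrix[r][c] == 1 and matrix[r + 1][c] == 1:
--                 edges += 1
--     return 2 * edges
-- ===== Notes on version B (the rewrite author's own statement) =====
-- stated objective: simpler
-- what changed: Replaced the per-cell neighbor enumeration (nbhs helper building a list of up to four neighbors for every cell) by two directional passes that count each adjacent 1-1 edge once (horizontal and vertical) and return twice the edge count, since A counts every adjacency from both endpoints.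
import Mathlib
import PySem

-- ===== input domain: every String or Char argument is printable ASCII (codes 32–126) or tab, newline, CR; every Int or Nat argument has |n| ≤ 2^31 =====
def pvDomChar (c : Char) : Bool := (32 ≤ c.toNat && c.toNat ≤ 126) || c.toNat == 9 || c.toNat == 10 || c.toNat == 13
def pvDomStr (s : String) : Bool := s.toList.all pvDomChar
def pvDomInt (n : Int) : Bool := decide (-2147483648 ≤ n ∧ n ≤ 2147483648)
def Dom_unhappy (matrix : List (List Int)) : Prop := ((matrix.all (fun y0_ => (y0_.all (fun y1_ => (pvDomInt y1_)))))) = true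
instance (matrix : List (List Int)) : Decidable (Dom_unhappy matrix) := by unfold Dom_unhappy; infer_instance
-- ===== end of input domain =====

-- B replaces A's per-cell neighbor enumeration by two directional edge-counting passes,
-- returning twice the edge count; equivalence of the return values is proved below.

-- ===== PORT A =====
-- matrix[i][j] with indices that are in range under Pre_unhappy (nbhs only yields in-range indices)
def cellA (m : List (List Int)) (r c : Nat) : Int := (m.getD r []).getD c 0

def nbhsL (row col R C : Nat) : List (Nat × Nat) :=
  (if row ≠ 0 then [(row - 1, col)] else []) ++
  (if row ≠ R - 1 then [(row + 1, col)] else []) ++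
  (if col ≠ 0 then [(row, col - 1)] else []) ++
  (if col ≠ C - 1 then [(row, col + 1)] else [])

def unhappy (matrix : List (List Int)) : Int :=
  let numRows := matrix.length
  let numCols := (matrix.getD 0 []).length
  (List.range numRows).foldl (fun count row =>
    (List.range numCols).foldl (fun count col =>
      if cellA matrix row col = 1 then
        count + ((nbhsL row col numRows numCols).map
          (fun n => if cellA matrix n.1 n.2 = 1 then (1 : Int) else 0)).sum
      else count) count) 0

-- ===== PORT B =====
def unhappy_alt (matrix : List (List Int)) : Int :=
  let numRows := matrix.length
  let numCols := (matrix.getD 0 []).length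
  let e1 : Int := (List.range numRows).foldl (fun e r =>
    (List.range (numCols - 1)).foldl (fun e c =>
      if cellA matrix r c = 1 ∧ cellA matrix r (c + 1) = 1 then e + 1 else e) e) 0
  let e2 : Int := (List.range (numRows - 1)).foldl (fun e r =>
    (List.range numCols).foldl (fun e c =>
      if cellA matrix r c = 1 ∧ cellA matrix (r + 1) c = 1 then e + 1 else e) e) e1
  2 * e2

-- ===== PRECONDITION & SPEC =====
-- Pre_ excludes exactly the inputs on which the Python A raises IndexError:
-- the empty matrix (matrix[0]) and matrices with a row shorter than the first row.
def Pre_unhappy (matrix : List (List Int)) : Prop :=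
  matrix ≠ [] ∧ ∀ row ∈ matrix, (matrix.headD []).length ≤ row.length
instance (matrix : List (List Int)) : Decidable (Pre_unhappy matrix) := by
  unfold Pre_unhappy; infer_instance

def pvWitness_unhappy : List (List Int) := [[1, 1], [0, 1]]

def Spec_unhappy (matrix : List (List Int)) (out : Int) : Prop := out = unhappy_alt matrix
instance (matrix : List (List Int)) (out : Int) : Decidable (Spec_unhappy matrix out) := by
  unfold Spec_unhappy; infer_instance

-- ===== CLAIM (what is proved, stated in full; the proofs are below) =====
def Claim_equal_unhappy : Prop := ∀ (matrix : List (List Int)), Dom_unhappy matrix → Pre_unhappy matrix → Spec_unhappy matrix (unhappy matrix)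

-- ===== LEMMAS AND PROOFS =====

-- indicator of an adjacent 1-1 pair
def pairInd (x y : Int) : Int := if x = 1 ∧ y = 1 then 1 else 0

theorem pairInd_comm (x y : Int) : pairInd x y = pairInd y x := by
  simp [pairInd, and_comm]

-- fold of pure accumulation is the sum of the mapped list
theorem foldl_step (l : List Nat) (t : Nat → Int) (init : Int) :
    l.foldl (fun acc i => acc + t i) init = init + (l.map t).sum := by
  induction l generalizing init with
  | nil => simp
  | cons x xs ih => simp [List.foldl_cons, ih, add_assoc]

theorem sum_map_add (l : List Nat) (f g : Nat → Int) :
    (l.map (fun i => f i + g i)).sum = (l.map f).sum + (l.map g).sum := by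
  induction l with
  | nil => simp
  | cons x xs ih => simp [ih]; ring

theorem shift_sum (h : Nat → Int) (m : Nat) :
    ((List.range (m + 1)).map (fun i => if i ≠ 0 then h (i - 1) else 0)).sum
      = ((List.range m).map h).sum := by
  rw [List.range_succ_eq_map]
  simp [List.map_map, Function.comp_def]

theorem trunc_sum (h : Nat → Int) (m : Nat) :
    ((List.range (m + 1)).map (fun i => if i ≠ m then h i else 0)).sum
      = ((List.range m).map h).sum := by
  rw [List.range_succ, List.map_append, List.sum_append]
  have h1 : ((List.range m).map (fun i => if i ≠ m then h i else 0)) = (List.range m).map h :=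
    List.map_congr_left (fun i hi => by simp [Nat.ne_of_lt (List.mem_range.mp hi)])
  rw [h1]; simp

-- the central identity: summing "left neighbor" and "right neighbor" indicators over a strip
-- equals twice the sum of consecutive-pair indicators
theorem strip (h : Nat → Int) (n : Nat) :
    ((List.range n).map (fun i =>
        (if i ≠ 0 then h (i - 1) else 0) + (if i ≠ n - 1 then h i else 0))).sum
      = 2 * ((List.range (n - 1)).map h).sum := by
  cases n with
  | zero => simp
  | succ m =>
    rw [sum_map_add, shift_sum]
    have : ((List.range (m + 1)).map (fun i => if i ≠ m + 1 - 1 then h i else 0)).sum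
        = ((List.range m).map h).sum := by
      simpa using trunc_sum h m
    rw [this]
    simp [two_mul]

-- A's per-cell contribution, written with pairInd
def termA (m : List (List Int)) (R C r c : Nat) : Int :=
  (if r ≠ 0 then pairInd (cellA m r c) (cellA m (r - 1) c) else 0)
  + (if r ≠ R - 1 then pairInd (cellA m r c) (cellA m (r + 1) c) else 0)
  + (if c ≠ 0 then pairInd (cellA m r c) (cellA m r (c - 1)) else 0)
  + (if c ≠ C - 1 then pairInd (cellA m r c) (cellA m r (c + 1)) else 0)

theorem cell_term (m : List (List Int)) (R C r c : Nat) :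
    (if cellA m r c = 1 then
        ((nbhsL r c R C).map (fun n => if cellA m n.1 n.2 = 1 then (1 : Int) else 0)).sum
      else 0) = termA m R C r c := by
  unfold nbhsL termA pairInd
  by_cases h : cellA m r c = 1
  · simp [h, apply_ite (List.map (fun n : Nat × Nat => if cellA m n.1 n.2 = 1 then (1 : Int) else 0)),
      apply_ite List.sum]
    split_ifs <;> ring
  · simp [h]

-- normal form of port A as a double sum of termA
theorem unhappy_eq_sum (m : List (List Int)) :
    unhappy m = ((List.range m.length).map (fun r =>
      ((List.range (m.getD 0 []).length).map
        (fun c => termA m m.length (m.getD 0 []).length r c)).sum)).sum := by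
  unfold unhappy
  show (List.range m.length).foldl (fun count row =>
    (List.range (m.getD 0 []).length).foldl (fun count col =>
      if cellA m row col = 1 then
        count + ((nbhsL row col m.length (m.getD 0 []).length).map
          (fun n => if cellA m n.1 n.2 = 1 then (1 : Int) else 0)).sum
      else count) count) 0 = _
  have hinner : ∀ (r : Nat) (init : Int),
      (List.range (m.getD 0 []).length).foldl (fun count col =>
        if cellA m r col = 1 then
          count + ((nbhsL r col m.length (m.getD 0 []).length).map
            (fun n => if cellA m n.1 n.2 = 1 then (1 : Int) else 0)).sum
        else count) init
      = init + ((List.range (m.getD 0 []).length).map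
          (fun c => termA m m.length (m.getD 0 []).length r c)).sum := by
    intro r init
    have hfun : (fun (count : Int) (col : Nat) =>
        if cellA m r col = 1 then
          count + ((nbhsL r col m.length (m.getD 0 []).length).map
            (fun n => if cellA m n.1 n.2 = 1 then (1 : Int) else 0)).sum
        else count)
      = (fun (count : Int) (col : Nat) =>
          count + termA m m.length (m.getD 0 []).length r col) := by
      funext count col
      rw [← cell_term m m.length (m.getD 0 []).length r col]
      split_ifs <;> simp
    rw [hfun, foldl_step]
  have houter : (fun (count : Int) (row : Nat) =>
      (List.range (m.getD 0 []).length).foldl (fun count col =>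
        if cellA m row col = 1 then
          count + ((nbhsL row col m.length (m.getD 0 []).length).map
            (fun n => if cellA m n.1 n.2 = 1 then (1 : Int) else 0)).sum
        else count) count)
    = (fun (count : Int) (row : Nat) =>
        count + ((List.range (m.getD 0 []).length).map
          (fun c => termA m m.length (m.getD 0 []).length row c)).sum) := by
    funext count row; exact hinner row count
  rw [houter, foldl_step]
  simp

-- normal form of port B
theorem unhappy_alt_eq_sum (m : List (List Int)) :
    unhappy_alt m =
      2 * (((List.range m.length).map (fun r =>
          ((List.range ((m.getD 0 []).length - 1)).map
            (fun c => pairInd (cellA m r c) (cellA m r (c + 1)))).sum)).sum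
        + ((List.range (m.length - 1)).map (fun r =>
          ((List.range (m.getD 0 []).length).map
            (fun c => pairInd (cellA m r c) (cellA m (r + 1) c))).sum)).sum) := by
  unfold unhappy_alt
  show 2 * ((List.range (m.length - 1)).foldl (fun e r =>
      (List.range (m.getD 0 []).length).foldl
        (fun e c => if cellA m r c = 1 ∧ cellA m (r + 1) c = 1 then e + 1 else e) e)
      ((List.range m.length).foldl (fun e r =>
        (List.range ((m.getD 0 []).length - 1)).foldl
          (fun e c => if cellA m r c = 1 ∧ cellA m r (c + 1) = 1 then e + 1 else e) e) 0)) = _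
  have hfold : ∀ (R C : Nat) (u v : Nat → Nat → Int) (init : Int),
      (List.range R).foldl (fun e r =>
        (List.range C).foldl (fun e c => if u r c = 1 ∧ v r c = 1 then e + 1 else e) e) init
      = init + ((List.range R).map (fun r =>
          ((List.range C).map (fun c => pairInd (u r c) (v r c))).sum)).sum := by
    intro R C u v init
    have hin : ∀ (r : Nat) (e : Int),
        (List.range C).foldl (fun e c => if u r c = 1 ∧ v r c = 1 then e + 1 else e) e
        = e + ((List.range C).map (fun c => pairInd (u r c) (v r c))).sum := by
      intro r e
      have hfun : (fun (e : Int) (c : Nat) => if u r c = 1 ∧ v r c = 1 then e + 1 else e)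
          = (fun (e : Int) (c : Nat) => e + pairInd (u r c) (v r c)) := by
        funext e c; unfold pairInd; split_ifs <;> simp
      rw [hfun, foldl_step]
    have hout : (fun (e : Int) (r : Nat) =>
        (List.range C).foldl (fun e c => if u r c = 1 ∧ v r c = 1 then e + 1 else e) e)
      = (fun (e : Int) (r : Nat) =>
          e + ((List.range C).map (fun c => pairInd (u r c) (v r c))).sum) := by
      funext e r; exact hin r e
    rw [hout, foldl_step]
  rw [hfold m.length ((m.getD 0 []).length - 1)
        (fun r c => cellA m r c) (fun r c => cellA m r (c + 1)) 0,
      hfold (m.length - 1) (m.getD 0 []).length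
        (fun r c => cellA m r c) (fun r c => cellA m (r + 1) c)]
  ring

-- horizontal part: A's left+right indicators over a row are twice B's horizontal edges
theorem horiz_row (m : List (List Int)) (C r : Nat) :
    ((List.range C).map (fun c =>
        (if c ≠ 0 then pairInd (cellA m r c) (cellA m r (c - 1)) else 0)
        + (if c ≠ C - 1 then pairInd (cellA m r c) (cellA m r (c + 1)) else 0))).sum
      = 2 * ((List.range (C - 1)).map
          (fun c => pairInd (cellA m r c) (cellA m r (c + 1)))).sum := by
  have hfun : (fun (c : Nat) =>
      (if c ≠ 0 then pairInd (cellA m r c) (cellA m r (c - 1)) else 0)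
      + (if c ≠ C - 1 then pairInd (cellA m r c) (cellA m r (c + 1)) else 0))
    = (fun (c : Nat) =>
      (if c ≠ 0 then (fun k => pairInd (cellA m r k) (cellA m r (k + 1))) (c - 1) else 0)
      + (if c ≠ C - 1 then (fun k => pairInd (cellA m r k) (cellA m r (k + 1))) c else 0)) := by
    funext c
    cases c with
    | zero => simp
    | succ k => simp [pairInd_comm]
  rw [hfun]
  exact strip (fun k => pairInd (cellA m r k) (cellA m r (k + 1))) C

-- vertical part
theorem vert_col (m : List (List Int)) (R C : Nat) :
    ((List.range R).map (fun r =>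
        (if r ≠ 0 then ((List.range C).map
            (fun c => pairInd (cellA m r c) (cellA m (r - 1) c))).sum else 0)
        + (if r ≠ R - 1 then ((List.range C).map
            (fun c => pairInd (cellA m r c) (cellA m (r + 1) c))).sum else 0))).sum
      = 2 * ((List.range (R - 1)).map (fun r =>
          ((List.range C).map (fun c => pairInd (cellA m r c) (cellA m (r + 1) c))).sum)).sum := by
  have hfun : (fun (r : Nat) =>
      (if r ≠ 0 then ((List.range C).map
          (fun c => pairInd (cellA m r c) (cellA m (r - 1) c))).sum else 0)
      + (if r ≠ R - 1 then ((List.range C).map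
          (fun c => pairInd (cellA m r c) (cellA m (r + 1) c))).sum else 0))
    = (fun (r : Nat) =>
      (if r ≠ 0 then (fun k => ((List.range C).map
          (fun c => pairInd (cellA m k c) (cellA m (k + 1) c))).sum) (r - 1) else 0)
      + (if r ≠ R - 1 then (fun k => ((List.range C).map
          (fun c => pairInd (cellA m k c) (cellA m (k + 1) c))).sum) r else 0)) := by
    funext r
    cases r with
    | zero => simp
    | succ k => simp [pairInd_comm]
  rw [hfun]
  exact strip (fun k =>
    ((List.range C).map (fun c => pairInd (cellA m k c) (cellA m (k + 1) c))).sum) R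

theorem unhappy_eq_alt (m : List (List Int)) : unhappy m = unhappy_alt m := by
  rw [unhappy_eq_sum, unhappy_alt_eq_sum]
  set R := m.length with hR
  set C := (m.getD 0 []).length with hC
  have hsplit : ∀ r : Nat,
      ((List.range C).map (fun c => termA m R C r c)).sum
      = (((if r ≠ 0 then ((List.range C).map
            (fun c => pairInd (cellA m r c) (cellA m (r - 1) c))).sum else 0)
        + (if r ≠ R - 1 then ((List.range C).map
            (fun c => pairInd (cellA m r c) (cellA m (r + 1) c))).sum else 0))
        + ((List.range C).map (fun c =>
            (if c ≠ 0 then pairInd (cellA m r c) (cellA m r (c - 1)) else 0)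
            + (if c ≠ C - 1 then pairInd (cellA m r c) (cellA m r (c + 1)) else 0))).sum) := by
    intro r
    unfold termA
    rw [show (fun c => (if r ≠ 0 then pairInd (cellA m r c) (cellA m (r - 1) c) else 0)
          + (if r ≠ R - 1 then pairInd (cellA m r c) (cellA m (r + 1) c) else 0)
          + (if c ≠ 0 then pairInd (cellA m r c) (cellA m r (c - 1)) else 0)
          + (if c ≠ C - 1 then pairInd (cellA m r c) (cellA m r (c + 1)) else 0))
        = (fun c : Nat => ((if r ≠ 0 then pairInd (cellA m r c) (cellA m (r - 1) c) else 0)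
            + (if r ≠ R - 1 then pairInd (cellA m r c) (cellA m (r + 1) c) else 0))
          + ((if c ≠ 0 then pairInd (cellA m r c) (cellA m r (c - 1)) else 0)
            + (if c ≠ C - 1 then pairInd (cellA m r c) (cellA m r (c + 1)) else 0))) from by
      funext c; ring]
    rw [sum_map_add, sum_map_add]
    congr 1
    · split_ifs <;> simp
  calc ((List.range R).map (fun r => ((List.range C).map (fun c => termA m R C r c)).sum)).sum
      = ((List.range R).map (fun r =>
          ((if r ≠ 0 then ((List.range C).map
              (fun c => pairInd (cellA m r c) (cellA m (r - 1) c))).sum else 0)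
          + (if r ≠ R - 1 then ((List.range C).map
              (fun c => pairInd (cellA m r c) (cellA m (r + 1) c))).sum else 0)))).sum
        + ((List.range R).map (fun r =>
          ((List.range C).map (fun c =>
            (if c ≠ 0 then pairInd (cellA m r c) (cellA m r (c - 1)) else 0)
            + (if c ≠ C - 1 then pairInd (cellA m r c) (cellA m r (c + 1)) else 0))).sum)).sum := by
        rw [← sum_map_add]
        exact congrArg List.sum (List.map_congr_left (fun r _ => hsplit r))
    _ = 2 * ((List.range (R - 1)).map (fun r =>
          ((List.range C).map (fun c => pairInd (cellA m r c) (cellA m (r + 1) c))).sum)).sum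
        + ((List.range R).map (fun r =>
          2 * ((List.range (C - 1)).map
            (fun c => pairInd (cellA m r c) (cellA m r (c + 1)))).sum)).sum := by
        rw [vert_col m R C]
        congr 1
        exact congrArg List.sum (List.map_congr_left (fun r _ => horiz_row m C r))
    _ = 2 * (((List.range R).map (fun r =>
          ((List.range (C - 1)).map
            (fun c => pairInd (cellA m r c) (cellA m r (c + 1)))).sum)).sum
        + ((List.range (R - 1)).map (fun r =>
          ((List.range C).map (fun c => pairInd (cellA m r c) (cellA m (r + 1) c))).sum)).sum) := by
        rw [show ((List.range R).map (fun r =>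
            2 * ((List.range (C - 1)).map
              (fun c => pairInd (cellA m r c) (cellA m r (c + 1)))).sum)).sum
          = 2 * ((List.range R).map (fun r =>
              ((List.range (C - 1)).map
                (fun c => pairInd (cellA m r c) (cellA m r (c + 1)))).sum)).sum from by
          induction (List.range R) with
          | nil => simp
          | cons x xs ih => simp [ih]; ring]
        ring

-- ===== VERDICT (by name: the statement is the Claim_ definition above) =====
theorem unhappy_spec : Claim_equal_unhappy := by
  intro matrix _ _
  unfold Spec_unhappy
  exact unhappy_eq_alt matrix
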